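-- pv_equiv track=rewrite | github.com/botfredes/desplugados-atividades | scripts/exportar_csv.py | determinar_campos
-- ===== SOURCE A (Python) =====
-- def determinar_campos(atividades):
--     """Determina todos os campos disponíveis nas atividades"""
--     campos = set()
--
--     for atividade in atividades:
--         campos.update(atividade.keys())
--
--     # Ordenar campos por prioridade
--     campos_prioritarios = [
--         'id', 'nome', 'categoria', 'faixa_etaria',
--         'tempo_entretenimento', 'preparo_adulto',
--         'nivel_bagunca', 'quantidade_materiais',
--         'materiais_necessarios', 'custo',
--         'tipo_atividade', 'energia_crianca',
--         'supervisao', 'local', 'habilidade_desenvolvida',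
--         'momento_ideal', 'clima', 'nivel_criatividade',
--         'objetivo', 'descricao', 'como_aplicar',
--         'precisa_antecipacao', 'porque_e_boa',
--         'o_que_resolve', 'tags', 'resumo_pais'
--     ]
--
--     # Adicionar campos prioritários primeiro
--     campos_ordenados = []
--     for campo in campos_prioritarios:
--         if campo in campos:
--             campos_ordenados.append(campo)
--             campos.remove(campo)
--
--     # Adicionar campos restantes
--     campos_ordenados.extend(sorted(campos))
--
--     return campos_ordenados
-- ===== SOURCE B (Python) =====
-- def determinar_campos(atividades):
--     """Determina todos os campos disponíveis nas atividades"""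
--     campos = set()
--     for atividade in atividades:
--         campos.update(atividade.keys())
--
--     campos_prioritarios = [
--         'id', 'nome', 'categoria', 'faixa_etaria',
--         'tempo_entretenimento', 'preparo_adulto',
--         'nivel_bagunca', 'quantidade_materiais',
--         'materiais_necessarios', 'custo',
--         'tipo_atividade', 'energia_crianca',
--         'supervisao', 'local', 'habilidade_desenvolvida',
--         'momento_ideal', 'clima', 'nivel_criatividade',
--         'objetivo', 'descricao', 'como_aplicar',
--         'precisa_antecipacao', 'porque_e_boa',
--         'o_que_resolve', 'tags', 'resumo_pais'
--     ]
--
--     # One keyed sort: priority fields rank by their index, all others share the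
--     # maximal rank and therefore sort alphabetically after them.
--     prioridade = {campo: i for i, campo in enumerate(campos_prioritarios)}
--     n = len(campos_prioritarios)
--     return sorted(campos, key=lambda c: (prioridade.get(c, n), c))
-- ===== Notes on version B (the rewrite author's own statement) =====
-- stated objective: idiomatic
-- what changed: Replaces the explicit priority-filter loop with in-place set removal plus a separate alphabetical sort of the leftovers by one single keyed sort over a rank table built with enumerate.
import Mathlib
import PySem

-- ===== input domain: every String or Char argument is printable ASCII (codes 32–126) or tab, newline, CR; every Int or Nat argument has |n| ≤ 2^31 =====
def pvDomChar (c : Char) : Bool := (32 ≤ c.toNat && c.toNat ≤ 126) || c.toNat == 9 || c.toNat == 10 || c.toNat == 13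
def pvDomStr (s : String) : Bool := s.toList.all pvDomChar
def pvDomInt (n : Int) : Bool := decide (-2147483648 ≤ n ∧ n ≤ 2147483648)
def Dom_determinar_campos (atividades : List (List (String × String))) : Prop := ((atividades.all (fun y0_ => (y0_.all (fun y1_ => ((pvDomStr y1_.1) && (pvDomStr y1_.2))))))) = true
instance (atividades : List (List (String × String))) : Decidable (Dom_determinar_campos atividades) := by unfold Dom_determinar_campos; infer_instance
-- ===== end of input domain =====

-- B replaces A's explicit priority-filter loop (with set removal) plus the separate
-- alphabetical sort of the leftovers by one single keyed sort over an enumerate-built rank table.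

-- the literal campos_prioritarios list both Pythons contain
def pvPrioritarios : List String :=
  ["id", "nome", "categoria", "faixa_etaria",
   "tempo_entretenimento", "preparo_adulto",
   "nivel_bagunca", "quantidade_materiais",
   "materiais_necessarios", "custo",
   "tipo_atividade", "energia_crianca",
   "supervisao", "local", "habilidade_desenvolvida",
   "momento_ideal", "clima", "nivel_criatividade",
   "objetivo", "descricao", "como_aplicar",
   "precisa_antecipacao", "porque_e_boa",
   "o_que_resolve", "tags", "resumo_pais"]

-- ===== PORT A =====
def determinar_campos (atividades : List (List (String × String))) : List String :=
  -- campos = set(); for atividade in atividades: campos.update(atividade.keys())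
  let campos : PySem.Set String :=
    atividades.foldl (fun s a => PySem.Set.update s (PySem.Dict.keys ⟨a⟩)) PySem.Set.empty
  -- for campo in campos_prioritarios: if campo in campos: append; campos.remove(campo)
  -- (remove is guarded by the membership test, so it equals discard here)
  let st :=
    pvPrioritarios.foldl (fun st campo =>
      if PySem.Set.contains st.2 campo then
        (st.1 ++ [campo], PySem.Set.discard st.2 campo)
      else st) (([] : List String), campos)
  -- campos_ordenados.extend(sorted(campos))
  st.1 ++ PySem.List.sorted st.2 (fun x => x) false

-- ===== PORT B =====
def determinar_campos_alt (atividades : List (List (String × String))) : List String :=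
  let campos : PySem.Set String :=
    atividades.foldl (fun s a => PySem.Set.update s (PySem.Dict.keys ⟨a⟩)) PySem.Set.empty
  -- prioridade = {campo: i for i, campo in enumerate(campos_prioritarios)}
  let prioridade : PySem.Dict String Int :=
    (PySem.List.enumerate pvPrioritarios).foldl (fun d p => d.insert p.2 p.1) PySem.Dict.empty
  let n : Int := (pvPrioritarios.length : Int)
  -- sorted(campos, key=lambda c: (prioridade.get(c, n), c))
  PySem.List.sorted2 campos (fun c => prioridade.getD c n) (fun c => c) false

-- ===== PRECONDITION & SPEC =====
def Spec_determinar_campos (atividades : List (List (String × String))) (out : List String) : Prop := out = determinar_campos_alt atividades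
instance (atividades : List (List (String × String))) (out : List String) : Decidable (Spec_determinar_campos atividades out) := by unfold Spec_determinar_campos; infer_instance

-- ===== CLAIM (what is proved, stated in full; the proofs are below) =====
def Claim_equal_determinar_campos : Prop := ∀ (atividades : List (List (String × String))), Dom_determinar_campos atividades → Spec_determinar_campos atividades (determinar_campos atividades)

-- ===== LEMMAS AND PROOFS =====

-- B's rank table and its sort key, as proof-side names
def pvPrioDict : PySem.Dict String Int :=
  (PySem.List.enumerate pvPrioritarios).foldl (fun d p => d.insert p.2 p.1) PySem.Dict.empty

def pvRank (c : String) : Int := pvPrioDict.getD c (pvPrioritarios.length : Int)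

def pvKey (c : String) : Int ×ₗ String := toLex (pvRank c, c)

-- sorted with a two-component key is sorted with the corresponding lexicographic key
theorem pv_sorted2_eq_sorted_lex (xs : List String) (k1 : String → Int) (k2 : String → String) :
    PySem.List.sorted2 xs k1 k2 false
      = PySem.List.sorted xs (fun x => toLex (k1 x, k2 x)) false := by
  unfold PySem.List.sorted2 PySem.List.sorted
  simp only []
  congr 1
  funext acc x
  congr 1
  funext a b
  rcases lt_trichotomy (k1 a) (k1 b) with h | h | h
  · simp [h, Prod.Lex.toLex_lt_toLex, asymm h]
  · simp [h, Prod.Lex.toLex_lt_toLex]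
  · simp [h, Prod.Lex.toLex_lt_toLex, asymm h, h.ne']

-- the set of fields collected from the activities
def pvCampos (atividades : List (List (String × String))) : PySem.Set String :=
  atividades.foldl (fun s a => PySem.Set.update s (PySem.Dict.keys ⟨a⟩)) PySem.Set.empty

theorem pv_nodup_update (s : PySem.Set String) (xs : List String) (h : s.Nodup) :
    (PySem.Set.update s xs).Nodup := by
  induction xs generalizing s with
  | nil => exact h
  | cons x t ih => exact ih _ (PySem.Set.nodup_add _ _ h)

theorem pv_nodup_campos (atividades : List (List (String × String))) :
    (pvCampos atividades).Nodup := by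
  unfold pvCampos
  suffices h : ∀ (s : PySem.Set String), s.Nodup →
      (atividades.foldl (fun s a => PySem.Set.update s (PySem.Dict.keys ⟨a⟩)) s).Nodup by
    exact h _ List.nodup_nil
  induction atividades with
  | nil => intro s hs; exact hs
  | cons a t ih => intro s hs; exact ih _ (pv_nodup_update _ _ hs)

-- characterization of A's priority loop
theorem pv_loopA (P : List String) (hP : P.Nodup) (out : List String) (s : PySem.Set String) :
    P.foldl (fun st campo =>
      if PySem.Set.contains st.2 campo then
        (st.1 ++ [campo], PySem.Set.discard st.2 campo)
      else st) (out, s)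
    = (out ++ P.filter (fun c => PySem.Set.contains s c),
       s.filter (fun y => !P.contains y)) := by
  induction P generalizing out s with
  | nil => simp
  | cons c t ih =>
    simp only [List.nodup_cons] at hP
    by_cases hc : PySem.Set.contains s c = true
    · simp only [List.foldl_cons, hc, if_pos]
      rw [ih hP.2]
      have h1 : List.filter (fun c1 => (s.discard c).contains c1) t
          = List.filter (fun c => s.contains c) t := by
        apply List.filter_congr
        intro x hx
        have hxc : x ≠ c := fun h => hP.1 (h ▸ hx)
        simp [PySem.Set.discard, PySem.Set.contains, List.mem_filter, hxc]
      have h2 : List.filter (fun y => !t.contains y) (s.discard c)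
          = List.filter (fun y => !(c :: t).contains y) s := by
        show List.filter _ (List.filter (fun y => !(y == c)) s) = _
        rw [List.filter_filter]
        apply List.filter_congr
        intro x hx
        simp [Bool.and_comm, beq_eq_decide]
      rw [h1, h2, List.filter_cons_of_pos hc, List.append_assoc]
      rfl
    · rw [List.foldl_cons, if_neg hc, ih hP.2]
      have hcs : c ∉ s := by simpa [PySem.Set.contains, List.contains_iff_mem] using hc
      rw [List.filter_cons_of_neg (by simpa using hc)]
      congr 1
      apply List.filter_congr
      intro x hx
      have hxc : x ≠ c := fun h => hcs (h ▸ hx)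
      simp [hxc]

theorem pv_rank_mem : ∀ c ∈ pvPrioritarios, pvRank c < 26 := by decide

theorem pv_map_snd_enumerate (xs : List String) (k : Int) :
    (PySem.List.enumerate xs k).map (fun p => p.2) = xs := by
  induction xs generalizing k with
  | nil => rfl
  | cons x t ih => simp [PySem.List.enumerate, ih]

theorem pv_rank_not_mem (c : String) (h : c ∉ pvPrioritarios) : pvRank c = 26 := by
  have hk : pvPrioDict.keys = PySem.Set.ofList pvPrioritarios := by
    have := PySem.Dict.keys_foldl_insert_key (ν := Int)
      (PySem.List.enumerate pvPrioritarios) (fun p => p.2) (fun _ p => p.1) PySem.Dict.empty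
    rw [pv_map_snd_enumerate] at this
    exact this
  have hcont : pvPrioDict.contains c = false := by
    by_contra hne
    have : c ∈ pvPrioDict.keys := by
      unfold PySem.Dict.contains at hne
      simp only [Bool.not_eq_false, List.any_eq_true] at hne
      obtain ⟨p, hp, he⟩ := hne
      simp only [beq_iff_eq] at he
      exact he ▸ List.mem_map_of_mem hp
    rw [hk, PySem.Set.mem_ofList] at this
    exact h this
  have hnone : pvPrioDict.get? c = none := (PySem.Dict.get?_eq_none_iff_contains _ _).mpr hcont
  unfold pvRank PySem.Dict.getD
  rw [hnone]
  rfl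

theorem pv_rank_pairwise : pvPrioritarios.Pairwise (fun a b => pvRank a < pvRank b) := by decide

theorem pv_main (atividades : List (List (String × String))) :
    determinar_campos atividades = determinar_campos_alt atividades := by
  have hPnd : pvPrioritarios.Nodup := by decide
  have hS := pv_nodup_campos atividades
  show (let st := pvPrioritarios.foldl _ (([] : List String), pvCampos atividades);
        st.1 ++ PySem.List.sorted st.2 (fun x => x) false) = _
  rw [pv_loopA pvPrioritarios hPnd [] (pvCampos atividades)]
  show List.filter (fun c => (pvCampos atividades).contains c) pvPrioritarios
        ++ PySem.List.sorted (List.filter (fun y => !pvPrioritarios.contains y) (pvCampos atividades)) (fun x => x) false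
      = _
  rw [show determinar_campos_alt atividades
      = PySem.List.sorted2 (pvCampos atividades)
          (fun c => pvPrioDict.getD c (pvPrioritarios.length : Int)) (fun c => c) false from rfl,
     pv_sorted2_eq_sorted_lex]
  set S := pvCampos atividades with hSdef
  set rest := List.filter (fun y => !pvPrioritarios.contains y) S with hrest
  set f1 := List.filter (fun c => S.contains c) pvPrioritarios with hf1
  have hrest_nd : rest.Nodup := hS.filter _
  have hperm : (f1 ++ PySem.List.sorted rest (fun x => x) false).Perm S := by
    have h2 : (PySem.List.sorted rest (fun x => x) false).Perm rest :=
      PySem.List.sorted_perm _ _ _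
    have h1 : f1.Perm (List.filter (fun y => pvPrioritarios.contains y) S) := by
      apply List.perm_of_nodup_nodup_toFinset_eq (hPnd.filter _) (hS.filter _)
      ext a
      simp [PySem.Set.contains, and_comm]
    exact ((h1.append h2).trans (List.filter_append_perm _ S))
  have hrank_rest : ∀ x ∈ rest, pvRank x = 26 := by
    intro x hx
    rw [hrest] at hx
    have := (List.mem_filter.mp hx).2
    simp only [Bool.not_eq_true', List.contains_eq_mem, decide_eq_false_iff_not] at this
    exact pv_rank_not_mem x this
  have hpw : (f1 ++ PySem.List.sorted rest (fun x => x) false).Pairwise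
      (fun a b => pvKey a < pvKey b) := by
    rw [List.pairwise_append]
    refine ⟨?_, ?_, ?_⟩
    · have := pv_rank_pairwise.filter (fun c => S.contains c)
      exact this.imp (fun h => by
        simp only [pvKey, Prod.Lex.toLex_lt_toLex]
        exact Or.inl h)
    · have hle := PySem.List.sorted_pairwise rest (fun x => x)
      have hnd : (PySem.List.sorted rest (fun x => x) false).Nodup :=
        (PySem.List.sorted_perm rest (fun x => x) false).nodup_iff.mpr hrest_nd
      have hlt := hle.and hnd
      refine hlt.imp_of_mem ?_
      intro a b ha hb ⟨hab, hne⟩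
      have haR : pvRank a = 26 :=
        hrank_rest a ((PySem.List.sorted_perm rest (fun x => x) false).mem_iff.mp ha)
      have hbR : pvRank b = 26 :=
        hrank_rest b ((PySem.List.sorted_perm rest (fun x => x) false).mem_iff.mp hb)
      simp only [pvKey, Prod.Lex.toLex_lt_toLex]
      exact Or.inr ⟨haR.trans hbR.symm, lt_of_le_of_ne hab hne⟩
    · intro a ha b hb
      have haP : a ∈ pvPrioritarios := (List.mem_filter.mp (hf1 ▸ ha)).1
      have hbR : pvRank b = 26 :=
        hrank_rest b ((PySem.List.sorted_perm rest (fun x => x) false).mem_iff.mp hb)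
      simp only [pvKey, Prod.Lex.toLex_lt_toLex]
      exact Or.inl (by rw [hbR]; exact pv_rank_mem a haP)
  exact (PySem.List.sorted_eq_of_perm_of_pairwise_lt S _ pvKey hperm hpw).symm

-- ===== VERDICT (by name: the statement is the Claim_ definition above) =====
theorem determinar_campos_spec : Claim_equal_determinar_campos := by
  intro ativ _
  unfold Spec_determinar_campos
  exact pv_main ativ
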